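-- pv_equiv track=rewrite | github.com/BrettGoreham/AdventOfCode2020 | day10/dayTen.py | find_part_2_but_better
-- ===== SOURCE A (Python) =====
-- def find_part_2_but_better(numbers, range_to_count):
--     solutions = []
--     for i in range(0, len(numbers)):
--         if numbers[i] <= 1:
--             solutions.append(1)
--         else:
--             solution = 0
--             count_back = 1
--             while i-count_back >= 0 and count_back <= range_to_count:
--                 if numbers[i] - range_to_count <= numbers[i - count_back]:
--                     solution += solutions[i-count_back]
--                 count_back += 1
--
--             solutions.append(solution)
--
--     return solutions[len(solutions) - 1]
-- ===== SOURCE B (Python) =====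
-- def find_part_2_but_better(numbers, range_to_count):
--     # Demand-driven DP: pass 1 marks the subproblems the final index actually
--     # depends on (backward reachability over the index/value window); pass 2
--     # evaluates the recurrence only on those, in a dict keyed by index.
--     n = len(numbers)
--     target = n - 1
--     needed = {target}
--     for i in range(n - 1, -1, -1):
--         if i in needed and numbers[i] > 1:
--             for j in range(max(0, i - range_to_count), i):
--                 if numbers[i] - range_to_count <= numbers[j]:
--                     needed.add(j)
--     sols = {}
--     for i in range(n):
--         if i in needed:
--             if numbers[i] <= 1:
--                 sols[i] = 1
--             else:
--                 sols[i] = sum(sols[j] for j in range(max(0, i - range_to_count), i)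
--                               if numbers[i] - range_to_count <= numbers[j])
--     return sols[target]
-- ===== Notes on version B (the rewrite author's own statement) =====
-- stated objective: alternative
-- what changed: B replaces A's dense bottom-up DP over an appended list with a demand-driven two-phase evaluation: a backward reachability pass marks the subproblems the final index actually depends on, then a sparse pass evaluates the recurrence only on those, stored in a dict keyed by index.
import Mathlib
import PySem

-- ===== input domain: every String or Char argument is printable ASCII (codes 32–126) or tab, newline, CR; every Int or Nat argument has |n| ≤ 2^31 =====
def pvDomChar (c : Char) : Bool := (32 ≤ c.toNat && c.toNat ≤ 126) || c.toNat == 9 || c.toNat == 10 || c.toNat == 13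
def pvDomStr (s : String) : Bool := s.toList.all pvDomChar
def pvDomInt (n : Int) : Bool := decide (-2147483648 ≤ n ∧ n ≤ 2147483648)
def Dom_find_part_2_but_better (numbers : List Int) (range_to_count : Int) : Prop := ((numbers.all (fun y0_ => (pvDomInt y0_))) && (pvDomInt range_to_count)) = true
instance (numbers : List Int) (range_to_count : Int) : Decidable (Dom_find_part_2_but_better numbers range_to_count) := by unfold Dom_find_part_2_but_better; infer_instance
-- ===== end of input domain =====

-- B replaces A's dense bottom-up DP over an appended list with a demand-driven two-phase evaluation:
-- a backward reachability pass marks the subproblems the target depends on, then a sparse pass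
-- evaluates the recurrence only on those, in a dict; same worst-case cost, different strategy.

-- ===== PORT A =====
-- A's inner 'while': scans backwards from index i (count_back = 1, 2, …) summing earlier solutions.
-- pyGetD … 0: the loop guards keep every index in range, so the default is never read.
-- (fuel = range_to_count.toNat at the call site bounds the iteration count count_back = 1 … range_to_count; it only makes the loop total)
def pvAWhile (numbers : List Int) (solutions : List Int) (range_to_count : Int)
    (i : Int) (solution : Int) (count_back : Int) : Nat → Int
  | 0 => solution
  | fuel + 1 =>
    if i - count_back ≥ 0 ∧ count_back ≤ range_to_count then
      pvAWhile numbers solutions range_to_count i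
        (if PySem.List.pyGetD numbers i 0 - range_to_count ≤ PySem.List.pyGetD numbers (i - count_back) 0 then
          solution + PySem.List.pyGetD solutions (i - count_back) 0
        else solution)
        (count_back + 1) fuel
    else solution

-- final 'solutions[len(solutions) - 1]': pyGetD's default is read only when numbers = [] (Python: IndexError, excluded by Pre_)
def find_part_2_but_better (numbers : List Int) (range_to_count : Int) : Int :=
  let solutions := (PySem.List.pyRange 0 (PySem.List.len numbers) 1).foldl
    (fun solutions i =>
      if PySem.List.pyGetD numbers i 0 ≤ 1 then solutions ++ [1]
      else solutions ++ [pvAWhile numbers solutions range_to_count i 0 1 range_to_count.toNat]) []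
  PySem.List.pyGetD solutions (PySem.List.len solutions - 1) 0

-- ===== PORT B =====
-- body of B's pass-1 loop: if i is needed and numbers[i] > 1, add every j of i's window to the set
def pvBMarkBody (numbers : List Int) (range_to_count : Int) (needed : PySem.Set Int) (i : Int) : PySem.Set Int :=
  if needed.contains i ∧ PySem.List.pyGetD numbers i 0 > 1 then
    (PySem.List.pyRange (max 0 (i - range_to_count)) i 1).foldl
      (fun nd j =>
        if PySem.List.pyGetD numbers i 0 - range_to_count ≤ PySem.List.pyGetD numbers j 0
        then PySem.Set.add nd j else nd) needed
  else needed

-- body of B's pass-2 loop: for needed i, sols[i] = 1 or the window sum ('sum(sols[j] …)';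
-- getD's default 0 is never read: every summed j is itself needed, hence already in sols)
def pvBDPBody (numbers : List Int) (range_to_count : Int) (needed : PySem.Set Int)
    (sols : PySem.Dict Int Int) (i : Int) : PySem.Dict Int Int :=
  if needed.contains i then
    if PySem.List.pyGetD numbers i 0 ≤ 1 then sols.insert i 1
    else sols.insert i
      ((PySem.List.pyRange (max 0 (i - range_to_count)) i 1).foldl
        (fun acc j =>
          if PySem.List.pyGetD numbers i 0 - range_to_count ≤ PySem.List.pyGetD numbers j 0
          then acc + sols.getD j 0 else acc) 0)
  else sols

-- final 'sols[target]': getD's default 0 is read only when numbers = [] (Python: KeyError, excluded by Pre_)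
def find_part_2_but_better_alt (numbers : List Int) (range_to_count : Int) : Int :=
  let n := PySem.List.len numbers
  let target := n - 1
  let needed := (PySem.List.pyRange (n - 1) (-1) (-1)).foldl
    (pvBMarkBody numbers range_to_count) (PySem.Set.add PySem.Set.empty target)
  let sols := (PySem.List.pyRange 0 n 1).foldl
    (pvBDPBody numbers range_to_count needed) PySem.Dict.empty
  PySem.Dict.getD sols target 0

-- ===== PRECONDITION & SPEC =====
-- Pre_ excludes only the empty list, on which Python A raises IndexError (solutions[len(solutions)-1] of []).
def Pre_find_part_2_but_better (numbers : List Int) (range_to_count : Int) : Prop := numbers ≠ []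
instance (numbers : List Int) (range_to_count : Int) : Decidable (Pre_find_part_2_but_better numbers range_to_count) := by unfold Pre_find_part_2_but_better; infer_instance

def pvWitness_find_part_2_but_better : List Int × Int := ([1, 2, 4], 3)

def Spec_find_part_2_but_better (numbers : List Int) (range_to_count : Int) (out : Int) : Prop := out = find_part_2_but_better_alt numbers range_to_count
instance (numbers : List Int) (range_to_count : Int) (out : Int) : Decidable (Spec_find_part_2_but_better numbers range_to_count out) := by unfold Spec_find_part_2_but_better; infer_instance

-- ===== CLAIM (what is proved, stated in full; the proofs are below) =====
def Claim_equal_find_part_2_but_better : Prop := ∀ (numbers : List Int) (range_to_count : Int), Dom_find_part_2_but_better numbers range_to_count → Pre_find_part_2_but_better numbers range_to_count → Spec_find_part_2_but_better numbers range_to_count (find_part_2_but_better numbers range_to_count)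

-- ===== LEMMAS AND PROOFS =====

-- The common specification: pvSol xs R i is the DP value of index i
-- (1 if xs[i] ≤ 1, else the sum of earlier values inside the index/value window).
abbrev pvCnd (xs : List Int) (R : Int) (i j : Nat) : Prop :=
  (i : Int) - (j : Int) ≤ R ∧ xs.getD i 0 - R ≤ xs.getD j 0

def pvStep (xs : List Int) (R : Int) (sols : List Int) (i : Nat) : Int :=
  if xs.getD i 0 ≤ 1 then 1
  else ∑ j ∈ Finset.range i, if pvCnd xs R i j then sols.getD j 0 else 0

def pvSolList (xs : List Int) (R : Int) : Nat → List Int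
  | 0 => []
  | m + 1 => pvSolList xs R m ++ [pvStep xs R (pvSolList xs R m) m]

def pvSol (xs : List Int) (R : Int) (i : Nat) : Int := pvStep xs R (pvSolList xs R i) i

lemma pvSolList_length (xs : List Int) (R : Int) (m : Nat) : (pvSolList xs R m).length = m := by
  induction m with
  | zero => rfl
  | succ m ih => simp [pvSolList, ih]

lemma pvSolList_getD (xs : List Int) (R : Int) {j m : Nat} (h : j < m) :
    (pvSolList xs R m).getD j 0 = pvSol xs R j := by
  induction m with
  | zero => omega
  | succ m ih =>
    rcases Nat.lt_succ_iff_lt_or_eq.mp h with h' | h'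
    · rw [pvSolList, List.getD, List.getElem?_append_left (by rw [pvSolList_length]; omega)]
      exact ih h'
    · subst h'
      rw [pvSolList, List.getD, List.getElem?_append_right (by rw [pvSolList_length])]
      simp [pvSolList_length, pvSol]

-- pvSol satisfies its own recurrence over pvSol values
lemma pvSol_eq (xs : List Int) (R : Int) (i : Nat) :
    pvSol xs R i = if xs.getD i 0 ≤ 1 then 1
      else ∑ j ∈ Finset.range i, if pvCnd xs R i j then pvSol xs R j else 0 := by
  show pvStep xs R (pvSolList xs R i) i = _
  unfold pvStep
  split
  · rfl
  · refine Finset.sum_congr rfl fun j hj => ?_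
    rw [pvSolList_getD xs R (Finset.mem_range.mp hj)]

-- ===== A side =====
lemma pvAWhile_eq (xs sols : List Int) (R : Int) (i : Nat) :
    ∀ (fu : Nat) (cb : Int), (R + 1 - cb).toNat ≤ fu → 1 ≤ cb → ∀ acc,
      pvAWhile xs sols R (i : Int) acc cb fu
        = acc + ∑ j ∈ Finset.range (((i : Int) - cb + 1).toNat),
            if pvCnd xs R i j then sols.getD j 0 else 0 := by
  intro fu
  induction fu with
  | zero =>
    intro cb hfu hcb acc
    rw [pvAWhile, Finset.sum_eq_zero, add_zero]
    intro j hj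
    rw [if_neg]
    rintro ⟨h1, -⟩
    have := Finset.mem_range.mp hj
    omega
  | succ fu ih =>
    intro cb hfu hcb acc
    rw [pvAWhile]
    by_cases hg : (i : Int) - cb ≥ 0 ∧ cb ≤ R
    · rw [if_pos hg, ih (cb + 1) (by omega) (by omega)]
      set t := ((i : Int) - cb).toNat with ht
      have htc : ((i : Int) - cb) = (t : Int) := by omega
      have h1 : ((i : Int) - cb + 1).toNat = t + 1 := by omega
      have h2 : ((i : Int) - (cb + 1) + 1).toNat = t := by omega
      rw [h1, h2, Finset.sum_range_succ, htc]
      simp only [PySem.List.pyGetD_natCast]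
      by_cases hC : xs.getD i 0 - R ≤ xs.getD t 0
      · rw [if_pos hC, if_pos (⟨by omega, hC⟩ : pvCnd xs R i t)]
        ring
      · rw [if_neg hC, if_neg (fun hc : pvCnd xs R i t => hC hc.2)]
        ring
    · rw [if_neg hg]
      rcases not_and_or.mp hg with h | h
      · have h0 : ((i : Int) - cb + 1).toNat = 0 := by omega
        rw [h0]
        simp
      · rw [Finset.sum_eq_zero, add_zero]
        intro j hj
        rw [if_neg]
        rintro ⟨h1, -⟩
        have := Finset.mem_range.mp hj
        omega

lemma pvAFold (xs : List Int) (R : Int) (m : Nat) :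
    (PySem.List.pyRange 0 (m : Int) 1).foldl
      (fun solutions i =>
        if PySem.List.pyGetD xs i 0 ≤ 1 then solutions ++ [1]
        else solutions ++ [pvAWhile xs solutions R i 0 1 R.toNat]) []
      = pvSolList xs R m := by
  induction m with
  | zero => rfl
  | succ m ih =>
    rw [show ((m + 1 : Nat) : Int) = (m : Int) + 1 by push_cast; ring,
        PySem.List.pyRange_one_succ_right (by omega), List.foldl_append, ih]
    simp only [List.foldl_cons, List.foldl_nil, PySem.List.pyGetD_natCast]
    rw [pvSolList]
    unfold pvStep
    by_cases hle : xs.getD m 0 ≤ 1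
    · rw [if_pos hle, if_pos hle]
    · rw [if_neg hle, if_neg hle, pvAWhile_eq xs _ R m R.toNat 1 (by omega) le_rfl 0]
      have h1 : ((m : Int) - 1 + 1).toNat = m := by omega
      rw [h1, zero_add]

-- ===== B side: pass 1 (reachability marking) =====

-- generic conditional-add fold: membership characterization
lemma pvFoldAdd_mem {P : Int → Prop} [DecidablePred P] :
    ∀ (l : List Int) (S : PySem.Set Int) (x : Int),
      x ∈ l.foldl (fun nd j => if P j then PySem.Set.add nd j else nd) S
        ↔ x ∈ S ∨ (x ∈ l ∧ P x) := by
  intro l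
  induction l with
  | nil => simp
  | cons a l ih =>
    intro S x
    rw [List.foldl_cons]
    by_cases hP : P a
    · rw [if_pos hP, ih]
      simp only [PySem.Set.mem_add, List.mem_cons]
      constructor
      · rintro ((h | rfl) | h)
        · exact Or.inl h
        · exact Or.inr ⟨Or.inl rfl, hP⟩
        · exact Or.inr ⟨Or.inr h.1, h.2⟩
      · rintro (h | ⟨rfl | h, hPx⟩)
        · exact Or.inl (Or.inl h)
        · exact Or.inl (Or.inr rfl)
        · exact Or.inr ⟨h, hPx⟩
    · rw [if_neg hP, ih]
      constructor
      · rintro (h | h)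
        · exact Or.inl h
        · exact Or.inr ⟨List.mem_cons_of_mem a h.1, h.2⟩
      · rintro (h | ⟨h, hPx⟩)
        · exact Or.inl h
        · rcases List.mem_cons.mp h with h | h
          · subst h; exact absurd hPx hP
          · exact Or.inr ⟨h, hPx⟩

-- the pass-1 body only adds elements (monotone)
lemma pvMarkBody_mono (xs : List Int) (R : Int) (S : PySem.Set Int) (i x : Int)
    (h : x ∈ S) : x ∈ pvBMarkBody xs R S i := by
  unfold pvBMarkBody
  split
  · rw [pvFoldAdd_mem]
    exact Or.inl h
  · exact h

-- anything the pass-1 body at index i adds is a Nat below i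
lemma pvMarkBody_new (xs : List Int) (R : Int) (S : PySem.Set Int) (i x : Int)
    (h : x ∈ pvBMarkBody xs R S i) : x ∈ S ∨ ∃ k : Nat, x = (k : Int) ∧ (k : Int) < i := by
  unfold pvBMarkBody at h
  split at h
  · rcases (pvFoldAdd_mem _ _ _).mp h with h | h
    · exact Or.inl h
    · have hm := PySem.List.mem_pyRange_one.mp h.1
      exact Or.inr ⟨x.toNat, by omega, by omega⟩
  · exact Or.inl h

-- if i is in the set and numbers[i] > 1, the pass-1 body at i adds all of i's window deps
lemma pvMarkBody_adds (xs : List Int) (R : Int) (S : PySem.Set Int) (i : Nat)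
    (hS : (i : Int) ∈ S) (hgt : xs.getD i 0 > 1) (j : Nat) (hj : j < i) (hc : pvCnd xs R i j) :
    (j : Int) ∈ pvBMarkBody xs R S (i : Int) := by
  unfold pvBMarkBody
  rw [if_pos ⟨(PySem.Set.contains_iff S (i : Int)).mpr hS, by simpa [PySem.List.pyGetD_natCast] using hgt⟩,
      pvFoldAdd_mem]
  refine Or.inr ⟨PySem.List.mem_pyRange_one.mpr ⟨by rcases hc with ⟨h1, -⟩; omega, by omega⟩, ?_⟩
  simpa [PySem.List.pyGetD_natCast] using hc.2

-- B's pass 1 as a structural recursion: process indices m-1, m-2, …, 0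
def pvMarkFrom (xs : List Int) (R : Int) (S : PySem.Set Int) : Nat → PySem.Set Int
  | 0 => S
  | m + 1 => pvMarkFrom xs R (pvBMarkBody xs R S (m : Int)) m

lemma pvMarkFold (xs : List Int) (R : Int) (m : Nat) :
    ∀ S, (PySem.List.pyRange ((m : Int) - 1) (-1) (-1)).foldl (pvBMarkBody xs R) S
      = pvMarkFrom xs R S m := by
  induction m with
  | zero =>
    intro S
    rw [PySem.List.pyRange_neg_one_eq_nil (by omega)]
    rfl
  | succ m ih =>
    intro S
    rw [show ((m + 1 : Nat) : Int) - 1 = (m : Int) by push_cast; ring,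
        PySem.List.pyRange_neg_one_cons (by omega), List.foldl_cons, ih]
    rfl

lemma pvMarkFrom_mono (xs : List Int) (R : Int) (m : Nat) :
    ∀ S x, x ∈ S → x ∈ pvMarkFrom xs R S m := by
  induction m with
  | zero => intro S x h; exact h
  | succ m ih =>
    intro S x h
    exact ih _ x (pvMarkBody_mono xs R S _ x h)

lemma pvMarkFrom_new (xs : List Int) (R : Int) (m : Nat) :
    ∀ S x, x ∈ pvMarkFrom xs R S m → x ∈ S ∨ ∃ k : Nat, x = (k : Int) ∧ k + 1 < m := by
  induction m with
  | zero => intro S x h; exact Or.inl h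
  | succ m ih =>
    intro S x h
    rcases ih _ x h with h | ⟨k, hk, hkm⟩
    · rcases pvMarkBody_new xs R S (m : Int) x h with h | ⟨k, hk, hkm⟩
      · exact Or.inl h
      · exact Or.inr ⟨k, hk, by omega⟩
    · exact Or.inr ⟨k, hk, by omega⟩

-- closure: the final marked set contains every window dep of each of its members below m
lemma pvMarkFrom_closed (xs : List Int) (R : Int) (m : Nat) :
    ∀ S (i : Nat), i < m → (i : Int) ∈ pvMarkFrom xs R S m → xs.getD i 0 > 1 →
      ∀ j : Nat, j < i → pvCnd xs R i j → (j : Int) ∈ pvMarkFrom xs R S m := by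
  induction m with
  | zero => omega
  | succ m ih =>
    intro S i him hiN hgt j hj hc
    by_cases hlt : i < m
    · exact ih _ i hlt hiN hgt j hj hc
    · have hieq : i = m := by omega
      subst hieq
      -- i = m was not added later (everything added after step m is < m), so it is in the
      -- set when step m runs, and step m was not added by step m itself either
      have hiS' : (i : Int) ∈ pvBMarkBody xs R S (i : Int) := by
        rcases pvMarkFrom_new xs R i _ _ hiN with h | ⟨k, hk, hkm⟩
        · exact h
        · exfalso; omega
      have hiS : (i : Int) ∈ S := by
        rcases pvMarkBody_new xs R S (i : Int) _ hiS' with h | ⟨k, hk, hkm⟩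
        · exact h
        · exfalso; omega
      exact pvMarkFrom_mono xs R i _ _ (pvMarkBody_adds xs R S i hiS hgt j hj hc)

-- ===== B side: pass 2 (sparse DP over the marked set) =====

-- the window-sum fold of pass 2, as a Finset sum
lemma pvSumFold (xs : List Int) (v R : Int) (D : PySem.Dict Int Int) (m : Nat) :
    ∀ (t : Nat) (a : Int), 0 ≤ a → (m : Int) ≤ a + t → ∀ init : Int,
      (PySem.List.pyRange a (m : Int) 1).foldl
        (fun acc j => if v - R ≤ PySem.List.pyGetD xs j 0 then acc + D.getD j 0 else acc) init
      = init + ∑ j ∈ Finset.range m,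
          if a ≤ (j : Int) ∧ v - R ≤ xs.getD j 0 then D.getD (j : Int) 0 else 0 := by
  intro t
  induction t with
  | zero =>
    intro a ha hat init
    rw [PySem.List.pyRange_one_eq_nil (by omega), List.foldl_nil, Finset.sum_eq_zero, add_zero]
    intro j hj
    rw [if_neg]
    rintro ⟨h1, -⟩
    have := Finset.mem_range.mp hj
    omega
  | succ t ih =>
    intro a ha hat init
    by_cases ham : a < (m : Int)
    case neg =>
      rw [PySem.List.pyRange_one_eq_nil (by omega), List.foldl_nil, Finset.sum_eq_zero, add_zero]
      intro j hj
      rw [if_neg]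
      rintro ⟨h1, -⟩
      have := Finset.mem_range.mp hj
      omega
    rw [PySem.List.pyRange_one_cons (by omega), List.foldl_cons,
        ih (a + 1) (by omega) (by omega)]
    set k := a.toNat with hk
    have hak : a = (k : Int) := by omega
    have hkm : k < m := by omega
    have hsplit : ∀ j ∈ Finset.range m,
        (if a ≤ (j : Int) ∧ v - R ≤ xs.getD j 0 then D.getD (j : Int) 0 else 0)
        = (if a + 1 ≤ (j : Int) ∧ v - R ≤ xs.getD j 0 then D.getD (j : Int) 0 else 0)
          + (if j = k then (if v - R ≤ xs.getD k 0 then D.getD (k : Int) 0 else 0) else 0) := by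
      intro j hj
      by_cases hjk : j = k
      · rw [if_pos hjk, hjk]
        by_cases hv : v - R ≤ xs.getD k 0
        · have h1 : a ≤ (k : Int) ∧ v - R ≤ xs.getD k 0 := ⟨by omega, hv⟩
          have h2 : ¬(a + 1 ≤ (k : Int) ∧ v - R ≤ xs.getD k 0) := by rintro ⟨h', -⟩; omega
          rw [if_pos h1, if_neg h2, if_pos hv, zero_add]
        · have h1 : ¬(a ≤ (k : Int) ∧ v - R ≤ xs.getD k 0) := fun h => hv h.2
          have h2 : ¬(a + 1 ≤ (k : Int) ∧ v - R ≤ xs.getD k 0) := fun h => hv h.2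
          rw [if_neg h1, if_neg h2, if_neg hv, add_zero]
      · rw [if_neg hjk, add_zero]
        refine if_congr ?_ rfl rfl
        constructor
        · rintro ⟨h1, h2⟩
          exact ⟨by omega, h2⟩
        · rintro ⟨h1, h2⟩
          exact ⟨by omega, h2⟩
    rw [Finset.sum_congr rfl hsplit, Finset.sum_add_distrib,
        Finset.sum_ite_eq' (Finset.range m) k
          (fun _ => if v - R ≤ xs.getD k 0 then D.getD (k : Int) 0 else 0),
        if_pos (Finset.mem_range.mpr hkm), hak]
    simp only [PySem.List.pyGetD_natCast]
    by_cases hv : v - R ≤ xs.getD k 0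
    · rw [if_pos hv, if_pos hv]
      ring
    · rw [if_neg hv, if_neg hv]
      ring

-- pass-2 invariant: after processing 0 … m-1, sols holds pvSol on every marked index below m
lemma pvDPFold (xs : List Int) (R : Int) (N : PySem.Set Int)
    (hcl : ∀ i : Nat, (i : Int) ∈ N → xs.getD i 0 > 1 →
      ∀ j : Nat, j < i → pvCnd xs R i j → (j : Int) ∈ N) :
    ∀ (m : Nat) (j : Nat), j < m → (j : Int) ∈ N →
      ((PySem.List.pyRange 0 (m : Int) 1).foldl (pvBDPBody xs R N) PySem.Dict.empty).getD (j : Int) 0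
        = pvSol xs R j := by
  intro m
  induction m with
  | zero => omega
  | succ m ih =>
    intro j hjm hjN
    rw [show ((m + 1 : Nat) : Int) = (m : Int) + 1 by push_cast; ring,
        PySem.List.pyRange_one_succ_right (by omega), List.foldl_append, List.foldl_cons,
        List.foldl_nil]
    set D := (PySem.List.pyRange 0 (m : Int) 1).foldl (pvBDPBody xs R N) PySem.Dict.empty with hD
    by_cases hjlt : j < m
    · -- the step at m does not touch key j < m
      have hne : (j : Int) ≠ (m : Int) := by
        intro h
        have : j = m := by exact_mod_cast h
        omega
      unfold pvBDPBody
      split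
      · split <;> rw [PySem.Dict.getD_insert_of_ne _ _ _ hne] <;> exact ih j hjlt hjN
      · exact ih j hjlt hjN
    · have hjeq : j = m := by omega
      subst hjeq
      unfold pvBDPBody
      rw [if_pos ((PySem.Set.contains_iff N ((j : Nat) : Int)).mpr hjN)]
      simp only [PySem.List.pyGetD_natCast]
      by_cases hle : xs.getD j 0 ≤ 1
      · rw [if_pos hle, PySem.Dict.getD_insert_self, pvSol_eq, if_pos hle]
      · rw [if_neg hle, PySem.Dict.getD_insert_self,
            pvSumFold xs (xs.getD j 0) R D j (((j : Int) - max 0 ((j : Int) - R)).toNat)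
              (max 0 ((j : Int) - R)) (by omega) (by omega) 0,
            zero_add, pvSol_eq, if_neg hle]
        refine Finset.sum_congr rfl fun j' hj' => ?_
        have hj'm := Finset.mem_range.mp hj'
        have hiff : (max 0 ((j : Int) - R) ≤ (j' : Int) ∧ xs.getD j 0 - R ≤ xs.getD j' 0)
            ↔ pvCnd xs R j j' := by
          constructor
          · rintro ⟨h1, h2⟩
            exact ⟨by omega, h2⟩
          · rintro ⟨h1, h2⟩
            exact ⟨by omega, h2⟩
        rw [if_congr hiff rfl rfl]
        by_cases hc : pvCnd xs R j j'
        · rw [if_pos hc, if_pos hc, ih j' hj'm (hcl j hjN (by omega) j' hj'm hc)]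
        · rw [if_neg hc, if_neg hc]

-- ===== VERDICT (by name: the statement is the Claim_ definition above) =====
theorem find_part_2_but_better_spec : Claim_equal_find_part_2_but_better := by
  intro xs R _ hpre
  unfold Spec_find_part_2_but_better
  have hn : 0 < xs.length := List.length_pos_iff.mpr hpre
  -- A computes pvSol at the last index
  have hfoldA : (PySem.List.pyRange 0 (PySem.List.len xs) 1).foldl
      (fun solutions i =>
        if PySem.List.pyGetD xs i 0 ≤ 1 then solutions ++ [1]
        else solutions ++ [pvAWhile xs solutions R i 0 1 R.toNat]) []
      = pvSolList xs R xs.length := by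
    rw [PySem.List.len_eq]
    exact pvAFold xs R xs.length
  have hA : find_part_2_but_better xs R = pvSol xs R (xs.length - 1) := by
    calc find_part_2_but_better xs R
        = PySem.List.pyGetD ((PySem.List.pyRange 0 (PySem.List.len xs) 1).foldl
            (fun solutions i =>
              if PySem.List.pyGetD xs i 0 ≤ 1 then solutions ++ [1]
              else solutions ++ [pvAWhile xs solutions R i 0 1 R.toNat]) [])
            (PySem.List.len ((PySem.List.pyRange 0 (PySem.List.len xs) 1).foldl
              (fun solutions i =>
                if PySem.List.pyGetD xs i 0 ≤ 1 then solutions ++ [1]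
                else solutions ++ [pvAWhile xs solutions R i 0 1 R.toNat]) []) - 1) 0 := rfl
      _ = PySem.List.pyGetD (pvSolList xs R xs.length) (PySem.List.len (pvSolList xs R xs.length) - 1) 0 := by
            rw [hfoldA]
      _ = pvSol xs R (xs.length - 1) := by
            rw [PySem.List.len_eq, pvSolList_length,
                show ((xs.length : Nat) : Int) - 1 = ((xs.length - 1 : Nat) : Int) by omega,
                PySem.List.pyGetD_natCast]
            exact pvSolList_getD xs R (by omega)
  -- B: the marked set, its closure, and the sparse DP
  set S0 : PySem.Set Int := PySem.Set.add PySem.Set.empty ((xs.length : Int) - 1) with hS0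
  set N := pvMarkFrom xs R S0 xs.length with hN
  have hfoldN : (PySem.List.pyRange ((xs.length : Int) - 1) (-1) (-1)).foldl
      (pvBMarkBody xs R) S0 = N := pvMarkFold xs R xs.length S0
  have htargetS0 : ((xs.length : Int) - 1) ∈ S0 := by
    rw [hS0]
    exact (PySem.Set.mem_add _ _ _).mpr (Or.inr rfl)
  have htarget : ((xs.length : Int) - 1) ∈ N := pvMarkFrom_mono xs R xs.length S0 _ htargetS0
  have hcl : ∀ i : Nat, (i : Int) ∈ N → xs.getD i 0 > 1 →
      ∀ j : Nat, j < i → pvCnd xs R i j → (j : Int) ∈ N := by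
    intro i hiN hgt j hj hc
    by_cases hlt : i < xs.length
    · exact pvMarkFrom_closed xs R xs.length S0 i hlt hiN hgt j hj hc
    · rw [List.getD_eq_default _ _ (by omega)] at hgt
      omega
  have hB : find_part_2_but_better_alt xs R = pvSol xs R (xs.length - 1) := by
    show PySem.Dict.getD ((PySem.List.pyRange 0 (PySem.List.len xs) 1).foldl
        (pvBDPBody xs R ((PySem.List.pyRange (PySem.List.len xs - 1) (-1) (-1)).foldl
          (pvBMarkBody xs R) (PySem.Set.add PySem.Set.empty (PySem.List.len xs - 1))))
        PySem.Dict.empty) (PySem.List.len xs - 1) 0 = _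
    rw [PySem.List.len_eq, hfoldN,
        show ((xs.length : Nat) : Int) - 1 = ((xs.length - 1 : Nat) : Int) by omega]
    exact pvDPFold xs R N hcl xs.length (xs.length - 1) (by omega)
      (by rwa [show (((xs.length - 1 : Nat) : Nat) : Int) = (xs.length : Int) - 1 by omega])
  rw [hA, hB]
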